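-- pv_equiv track=rewrite | github.com/developerHub01/Selenium-Web-Scraping | codeforces details/codeforces.py | separateProblemIdAndContestId
-- ===== SOURCE A (Python) =====
-- def separateProblemIdAndContestId(id):
--   contestId = ""
--   problemId = ""
--
--   isOrNot = False
--   for j in range(len(id)):
--     j = len(id)-j-1
--     if not isOrNot:
--       problemId += id[j]
--     else:
--       contestId += id[j]
--
--     if id[j].isalpha():
--       isOrNot = True
--   return contestId, problemId
-- ===== SOURCE B (Python) =====
-- def separateProblemIdAndContestId(id):
--   p = 0
--   for j in range(len(id) - 1, -1, -1):
--     if id[j].isalpha():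
--       p = j
--       break
--   contestId = id[:p][::-1]
--   problemId = id[p:][::-1]
--   return contestId, problemId
-- ===== Notes on version B (the rewrite author's own statement) =====
-- stated objective: faster
-- what changed: A's single flag-driven right-to-left pass that builds both strings char by char is replaced by locating the rightmost alphabetic index and producing the two parts as reversed slices id[:p][::-1] and id[p:][::-1].
import Mathlib
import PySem

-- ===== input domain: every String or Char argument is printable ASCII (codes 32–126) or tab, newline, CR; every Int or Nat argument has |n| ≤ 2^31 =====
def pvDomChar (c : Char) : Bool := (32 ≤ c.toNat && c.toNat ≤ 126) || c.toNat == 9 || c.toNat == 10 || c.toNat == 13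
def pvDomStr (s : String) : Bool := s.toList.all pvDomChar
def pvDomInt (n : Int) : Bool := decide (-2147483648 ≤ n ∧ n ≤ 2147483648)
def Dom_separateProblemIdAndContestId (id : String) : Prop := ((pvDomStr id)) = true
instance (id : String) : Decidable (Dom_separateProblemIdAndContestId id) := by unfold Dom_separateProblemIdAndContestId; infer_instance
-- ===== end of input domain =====

-- B locates the rightmost alphabetic index first, then slices and reverses; A's single
-- flag-driven right-to-left pass is replaced by this locate-then-slice decomposition
-- (the reversed outputs of A are reproduced exactly).

-- ===== PORT A =====
def separateProblemIdAndContestId (id : String) : String × String :=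
  let cs := id.toList
  let st := (PySem.List.pyRange 0 (cs.length : Int) 1).foldl
    (fun (st : List Char × List Char × Bool) j =>
      let j := (cs.length : Int) - j - 1
      let ch := PySem.List.pyGetD cs j ' '
      let st' := if st.2.2 = false then (st.1, st.2.1 ++ [ch], st.2.2)
                 else (st.1 ++ [ch], st.2.1, st.2.2)
      if PySem.Chars.isalpha ch then (st'.1, st'.2.1, true) else st')
    (([] : List Char), ([] : List Char), false)
  (String.ofList st.1, String.ofList st.2.1)

-- ===== PORT B =====
-- the 'for j in range(len(id)-1, -1, -1): … break' search, as recursion over the reversed characters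
def pvFindP : List Char → Nat → Nat
  | [], _ => 0
  | c :: rest, j => if PySem.Chars.isalpha c then j else pvFindP rest (j - 1)

def separateProblemIdAndContestId_alt (id : String) : String × String :=
  let cs := id.toList
  let p := pvFindP cs.reverse (cs.length - 1)
  let contestId := (PySem.List.slice cs none (some (p : Int))).reverse
  let problemId := (PySem.List.slice cs (some (p : Int)) none).reverse
  (String.ofList contestId, String.ofList problemId)

-- ===== PRECONDITION & SPEC =====
def Spec_separateProblemIdAndContestId (id : String) (out : String × String) : Prop := out = separateProblemIdAndContestId_alt id
instance (id : String) (out : String × String) : Decidable (Spec_separateProblemIdAndContestId id out) := by unfold Spec_separateProblemIdAndContestId; infer_instance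

-- ===== CLAIM (what is proved, stated in full; the proofs are below) =====
def Claim_equal_separateProblemIdAndContestId : Prop := ∀ (id : String), Dom_separateProblemIdAndContestId id → Spec_separateProblemIdAndContestId id (separateProblemIdAndContestId id)

-- ===== LEMMAS AND PROOFS =====

-- A's loop body, applied to one character (proof-side name for the port's lambda)
def pvStep (st : List Char × List Char × Bool) (ch : Char) : List Char × List Char × Bool :=
  let st' := if st.2.2 = false then (st.1, st.2.1 ++ [ch], st.2.2)
             else (st.1 ++ [ch], st.2.1, st.2.2)
  if PySem.Chars.isalpha ch then (st'.1, st'.2.1, true) else st'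

lemma pv_map_rev (cs : List Char) :
    (PySem.List.pyRange 0 (cs.length : Int) 1).map
      (fun j => PySem.List.pyGetD cs ((cs.length : Int) - j - 1) ' ') = cs.reverse := by
  apply List.ext_getElem
  · simp [PySem.List.length_pyRange_one]
  · intro k h1 h2
    have hk : k < cs.length := by
      simpa [PySem.List.length_pyRange_one] using h1
    simp only [List.getElem_map, PySem.List.getElem_pyRange_one, zero_add]
    have hcast : (cs.length : Int) - (k : Int) - 1 = ((cs.length - 1 - k : Nat) : Int) := by
      omega
    rw [hcast, PySem.List.pyGetD_natCast]
    rw [List.getElem_reverse]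
    rw [List.getD_eq_getElem _ _ (by omega)]

lemma pv_foldA_eq (cs : List Char) :
    (PySem.List.pyRange 0 (cs.length : Int) 1).foldl
      (fun (st : List Char × List Char × Bool) j =>
        let j := (cs.length : Int) - j - 1
        let ch := PySem.List.pyGetD cs j ' '
        let st' := if st.2.2 = false then (st.1, st.2.1 ++ [ch], st.2.2)
                   else (st.1 ++ [ch], st.2.1, st.2.2)
        if PySem.Chars.isalpha ch then (st'.1, st'.2.1, true) else st')
      (([] : List Char), ([] : List Char), false)
    = cs.reverse.foldl pvStep (([] : List Char), ([] : List Char), false) := by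
  rw [← pv_map_rev cs, List.foldl_map]
  rfl

lemma pv_loop_true (l : List Char) (c p : List Char) :
    l.foldl pvStep (c, p, true) = (c ++ l, p, true) := by
  induction l generalizing c with
  | nil => simp
  | cons ch t ih =>
    simp only [List.foldl_cons]
    have hstep : pvStep (c, p, true) ch = (c ++ [ch], p, true) := by
      simp [pvStep]
    rw [hstep, ih]
    simp

lemma pv_loop_main (l : List Char) (c p : List Char) :
    l.foldl pvStep (c, p, false) =
      match l.dropWhile (fun ch => !PySem.Chars.isalpha ch) with
      | [] => (c, p ++ l, false)
      | a :: rest => (c ++ rest, p ++ l.takeWhile (fun ch => !PySem.Chars.isalpha ch) ++ [a], true) := by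
  induction l generalizing p with
  | nil => simp
  | cons ch t ih =>
    by_cases ha : PySem.Chars.isalpha ch
    · have hstep : pvStep (c, p, false) ch = (c, p ++ [ch], true) := by
        simp [pvStep, ha]
      simp only [List.foldl_cons, hstep, pv_loop_true,
        List.dropWhile_cons, List.takeWhile_cons, ha]
      simp
    · have hstep : pvStep (c, p, false) ch = (c, p ++ [ch], false) := by
        simp [pvStep, ha]
      simp only [List.foldl_cons, hstep, ih (p ++ [ch]),
        List.dropWhile_cons, List.takeWhile_cons, ha]
      cases hdt : t.dropWhile (fun ch => !PySem.Chars.isalpha ch) <;> simp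

lemma pv_dropWhile_head (q : Char → Bool) (l : List Char) (a : Char) {rest : List Char}
    (h : l.dropWhile q = a :: rest) : q a = false := by
  induction l with
  | nil => simp at h
  | cons c t ih =>
    by_cases hc : q c
    · exact ih (by simpa [List.dropWhile_cons, hc] using h)
    · rw [List.dropWhile_cons_of_neg (by simpa using hc)] at h
      cases h
      simpa using hc

lemma pv_findP_none (l : List Char) (j : Nat)
    (h : ∀ c ∈ l, PySem.Chars.isalpha c = false) : pvFindP l j = 0 := by
  induction l generalizing j with
  | nil => rfl
  | cons c t ih =>
    simp only [pvFindP, h c (by simp)]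
    simp only [Bool.false_eq_true, if_false]
    exact ih _ fun x hx => h x (by simp [hx])

lemma pv_findP_app (pre : List Char) (a : Char) (rest : List Char) (j : Nat)
    (hpre : ∀ c ∈ pre, PySem.Chars.isalpha c = false)
    (ha : PySem.Chars.isalpha a = true) :
    pvFindP (pre ++ a :: rest) j = j - pre.length := by
  induction pre generalizing j with
  | nil => simp [pvFindP, ha]
  | cons c t ih =>
    simp only [List.cons_append, pvFindP, hpre c (by simp), Bool.false_eq_true, if_false]
    rw [ih _ fun x hx => hpre x (by simp [hx])]
    simp only [List.length_cons]
    omega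

-- ===== VERDICT (by name: the statement is the Claim_ definition above) =====
theorem separateProblemIdAndContestId_spec : Claim_equal_separateProblemIdAndContestId := by
  intro id _
  unfold Spec_separateProblemIdAndContestId
  unfold separateProblemIdAndContestId separateProblemIdAndContestId_alt
  simp only []
  rw [pv_foldA_eq]
  set cs := id.toList with hcs
  cases hdw : cs.reverse.dropWhile (fun ch => !PySem.Chars.isalpha ch) with
  | nil =>
    have hall : ∀ c ∈ cs.reverse, PySem.Chars.isalpha c = false := by
      intro c hc
      have := List.dropWhile_eq_nil_iff.mp hdw
      simpa using this c hc
    rw [pv_loop_main, hdw]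
    rw [pv_findP_none _ _ hall]
    simp [PySem.List.slice_to, PySem.List.slice_from]
  | cons a rest =>
    have hsplit : cs.reverse = cs.reverse.takeWhile (fun ch => !PySem.Chars.isalpha ch) ++ a :: rest := by
      conv_lhs => rw [← List.takeWhile_append_dropWhile (p := fun ch => !PySem.Chars.isalpha ch) (l := cs.reverse)]
      rw [hdw]
    set pre := cs.reverse.takeWhile (fun ch => !PySem.Chars.isalpha ch) with hpredef
    have hpre : ∀ c ∈ pre, PySem.Chars.isalpha c = false := by
      intro c hc
      have := List.mem_takeWhile_imp hc
      simpa using this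
    have ha : PySem.Chars.isalpha a = true := by
      have := pv_dropWhile_head _ _ _ hdw
      simpa using this
    have hlen : cs.length = pre.length + 1 + rest.length := by
      have := congrArg List.length hsplit
      simp at this
      omega
    have hfind : pvFindP cs.reverse (cs.length - 1) = rest.length := by
      rw [hsplit, pv_findP_app pre a rest _ hpre ha]
      omega
    rw [pv_loop_main, hdw, hfind]
    have hcseq : cs = rest.reverse ++ a :: pre.reverse := by
      have := congrArg List.reverse hsplit
      simpa using this
    rw [PySem.List.slice_to_natCast, PySem.List.slice_from_natCast]
    have h1 : List.take rest.length cs = rest.reverse := by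
      rw [hcseq, List.take_append_of_le_length (by simp)]
      simp
    have h2 : List.drop rest.length cs = a :: pre.reverse := by
      rw [hcseq, List.drop_append_of_le_length (by simp)]
      simp
    rw [h1, h2, ← hpredef]
    simp
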